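-- pv_equiv track=rewrite | github.com/ambitious3/Metody-Numeryczne | Metody numeryczne/lab05.py | szyfrPrzestawieniowy
-- ===== SOURCE A (Python) =====
-- def isLower(znak):
--     if znak >= 'a' and znak <= 'z':
--         return True
--     return False
--
-- def isUpper(znak):
--     if znak >= 'A' and znak <= 'Z':
--         return True
--     return False
--
-- def szyfrPrzestawieniowy(tekst, klucz, dekodowanie = False):
--     zaszyfrowany = ""
--     i = 0
--     for znak in tekst:
--         nowy = ord(znak)
--         kod = ord(klucz[i])
--         if dekodowanie:
--             kod = - kod
--         if isLower(znak):
--             nowy = (nowy + kod - 97) % 26 + 97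
--             i += 1
--         elif isUpper(znak):
--             nowy = (nowy + kod - 65) % 26 + 65
--             i += 1
--         i %= len(klucz)
--         zaszyfrowany += chr(nowy)
--     return zaszyfrowany
-- ===== SOURCE B (Python) =====
-- def isLower(znak):
--     return 'a' <= znak <= 'z'
--
-- def isUpper(znak):
--     return 'A' <= znak <= 'Z'
--
-- def szyfrPrzestawieniowy(tekst, klucz, dekodowanie = False):
--     # Pass 1: key stream — the key code active at each text position.
--     kody = []
--     i = 0
--     for znak in tekst:
--         kody.append(ord(klucz[i]))
--         if isLower(znak) or isUpper(znak):
--             i = (i + 1) % len(klucz)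
--     # Pass 2: transform each character with its precomputed code.
--     wynik = []
--     for znak, kod in zip(tekst, kody):
--         if dekodowanie:
--             kod = -kod
--         if isLower(znak):
--             wynik.append(chr((ord(znak) + kod - 97) % 26 + 97))
--         elif isUpper(znak):
--             wynik.append(chr((ord(znak) + kod - 65) % 26 + 65))
--         else:
--             wynik.append(znak)
--     return ''.join(wynik)
-- ===== Notes on version B (the rewrite author's own statement) =====
-- stated objective: alternative
-- what changed: B replaces A's single fused loop (mutable index, running string concatenation) with two separate passes: pass 1 builds the key-code stream active at each position, pass 2 zips text with that stream and maps each character independently, joining a list at the end.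
import Mathlib
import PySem

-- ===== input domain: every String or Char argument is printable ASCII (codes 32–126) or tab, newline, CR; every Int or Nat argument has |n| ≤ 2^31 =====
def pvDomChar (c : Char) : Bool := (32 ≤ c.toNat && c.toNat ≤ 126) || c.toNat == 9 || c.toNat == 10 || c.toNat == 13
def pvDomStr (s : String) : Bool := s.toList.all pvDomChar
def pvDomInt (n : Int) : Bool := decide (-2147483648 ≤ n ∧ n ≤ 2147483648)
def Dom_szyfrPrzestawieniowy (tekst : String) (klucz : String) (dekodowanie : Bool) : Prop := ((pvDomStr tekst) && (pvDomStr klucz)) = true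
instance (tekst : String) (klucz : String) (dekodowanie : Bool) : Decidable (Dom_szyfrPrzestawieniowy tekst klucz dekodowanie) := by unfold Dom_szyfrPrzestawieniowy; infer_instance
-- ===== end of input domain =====

-- B restructures A's single fused loop into two passes (key-code stream, then per-character transform); return value proved equal on Pre_.

-- ===== PORT A =====
def isLowerA (znak : Char) : Bool := if 'a' ≤ znak ∧ znak ≤ 'z' then true else false

def isUpperA (znak : Char) : Bool := if 'A' ≤ znak ∧ znak ≤ 'Z' then true else false

-- the for-loop of A: state (i, accumulated characters); klucz[i] via pyGet? (none = IndexError, excluded by Pre_)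
def pvALoop (kl : List Char) (dek : Bool) : List Char → Int → List Char → List Char
  | [], _, acc => acc
  | znak :: rest, i, acc =>
    let nowy : Int := (znak.toNat : Int)
    let kod : Int := (((PySem.List.pyGet? kl i).getD ' ').toNat : Int)
    let kod : Int := if dek then -kod else kod
    let p : Int × Int :=
      if isLowerA znak then (PySem.Int.mod (nowy + kod - 97) 26 + 97, i + 1)
      else if isUpperA znak then (PySem.Int.mod (nowy + kod - 65) 26 + 65, i + 1)
      else (nowy, i)
    pvALoop kl dek rest (PySem.Int.mod p.2 (kl.length : Int)) (acc ++ [Char.ofNat p.1.toNat])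

def szyfrPrzestawieniowy (tekst : String) (klucz : String) (dekodowanie : Bool) : String :=
  String.ofList (pvALoop klucz.toList dekodowanie tekst.toList 0 [])

-- ===== PORT B =====
def isLowerB (znak : Char) : Bool := decide ('a' ≤ znak ∧ znak ≤ 'z')

def isUpperB (znak : Char) : Bool := decide ('A' ≤ znak ∧ znak ≤ 'Z')

-- pass 1 of B: the key code active at each text position (klucz[i] via pyGet?; none = IndexError, excluded by Pre_)
def pvKody (kl : List Char) : List Char → Int → List Int
  | [], _ => []
  | znak :: rest, i =>
    (((PySem.List.pyGet? kl i).getD ' ').toNat : Int) ::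
      pvKody kl rest (if isLowerB znak || isUpperB znak then PySem.Int.mod (i + 1) (kl.length : Int) else i)

-- pass 2 of B: transform one character with its precomputed code
def pvTrans (dek : Bool) (znak : Char) (kod : Int) : Char :=
  let kod : Int := if dek then -kod else kod
  if isLowerB znak then Char.ofNat ((PySem.Int.mod ((znak.toNat : Int) + kod - 97) 26) + 97).toNat
  else if isUpperB znak then Char.ofNat ((PySem.Int.mod ((znak.toNat : Int) + kod - 65) 26) + 65).toNat
  else znak

def szyfrPrzestawieniowy_alt (tekst : String) (klucz : String) (dekodowanie : Bool) : String :=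
  String.ofList (List.zipWith (pvTrans dekodowanie) tekst.toList (pvKody klucz.toList tekst.toList 0))

-- ===== PRECONDITION & SPEC =====
-- Pre_ excludes exactly the inputs where Python A raises IndexError at klucz[i]: a nonempty text with an empty key (B raises there too).
def Pre_szyfrPrzestawieniowy (tekst : String) (klucz : String) (dekodowanie : Bool) : Prop :=
  tekst.toList ≠ [] → klucz.toList ≠ []
instance (tekst : String) (klucz : String) (dekodowanie : Bool) : Decidable (Pre_szyfrPrzestawieniowy tekst klucz dekodowanie) := by unfold Pre_szyfrPrzestawieniowy; infer_instance

def pvWitness_szyfrPrzestawieniowy : String × String × Bool := ("Ala ma Kota!", "klucz", false)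

def Spec_szyfrPrzestawieniowy (tekst : String) (klucz : String) (dekodowanie : Bool) (out : String) : Prop := out = szyfrPrzestawieniowy_alt tekst klucz dekodowanie
instance (tekst : String) (klucz : String) (dekodowanie : Bool) (out : String) : Decidable (Spec_szyfrPrzestawieniowy tekst klucz dekodowanie out) := by unfold Spec_szyfrPrzestawieniowy; infer_instance

-- ===== CLAIM (what is proved, stated in full; the proofs are below) =====
def Claim_equal_szyfrPrzestawieniowy : Prop := ∀ (tekst : String) (klucz : String) (dekodowanie : Bool), Dom_szyfrPrzestawieniowy tekst klucz dekodowanie → Pre_szyfrPrzestawieniowy tekst klucz dekodowanie → Spec_szyfrPrzestawieniowy tekst klucz dekodowanie (szyfrPrzestawieniowy tekst klucz dekodowanie)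

-- ===== LEMMAS AND PROOFS =====

theorem pvALoop_eq_zip (kl : List Char) (_hk : kl ≠ []) (dek : Bool) :
    ∀ (L : List Char) (i : Int) (acc : List Char), 0 ≤ i → i < (kl.length : Int) →
      pvALoop kl dek L i acc = acc ++ List.zipWith (pvTrans dek) L (pvKody kl L i) := by
  intro L
  induction L with
  | nil => intro i acc _ _; simp [pvALoop, pvKody]
  | cons znak rest ih =>
    intro i acc h0 hlt
    have hlen : (0 : Int) < (kl.length : Int) := lt_of_le_of_lt h0 hlt
    have hmodi : PySem.Int.mod i (kl.length : Int) = i := by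
      rw [PySem.Int.mod_eq_emod_of_pos hlen]; exact Int.emod_eq_of_lt h0 hlt
    have hn1 : 0 ≤ PySem.Int.mod (i + 1) (kl.length : Int) := PySem.Int.mod_nonneg _ hlen
    have hn2 : PySem.Int.mod (i + 1) (kl.length : Int) < (kl.length : Int) := PySem.Int.mod_lt _ hlen
    by_cases hl : 'a' ≤ znak ∧ znak ≤ 'z' <;> by_cases hu : 'A' ≤ znak ∧ znak ≤ 'Z' <;>
      simp [pvALoop, pvKody, pvTrans, isLowerA, isUpperA, isLowerB, isUpperB, hl, hu, hmodi] <;>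
      first
        | (rw [ih _ _ hn1 hn2]; simp)
        | (rw [ih _ _ h0 hlt]; simp)

-- ===== VERDICT (by name: the statement is the Claim_ definition above) =====
theorem szyfrPrzestawieniowy_spec : Claim_equal_szyfrPrzestawieniowy := by
  intro tekst klucz dek _hdom hpre
  unfold Spec_szyfrPrzestawieniowy szyfrPrzestawieniowy szyfrPrzestawieniowy_alt
  by_cases ht : tekst.toList = []
  · simp [ht, pvALoop, pvKody]
  · have hk : klucz.toList ≠ [] := hpre ht
    have hlen : (0 : Int) < (klucz.toList.length : Int) := by
      have : klucz.toList.length ≠ 0 := by simpa using hk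
      omega
    rw [pvALoop_eq_zip klucz.toList hk dek tekst.toList 0 [] le_rfl hlen]
    simp
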